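-- pv_equiv track=rewrite | github.com/humburger/marshmellow_data | read_file_to_array.py | create_str_list
-- ===== SOURCE A (Python) =====
-- def create_str_list(arr):
--     result = ""
--     for str in arr:
--         if str == arr[0]:
--             result = "'" + str + "'"
--         else:
--             result = result + ", '" + str + "'"
--     return result
-- ===== SOURCE B (Python) =====
-- def create_str_list(arr):
--     return ", ".join("'" + x + "'" for x in arr)
-- ===== Notes on version B (the rewrite author's own statement) =====
-- stated objective: simpler
-- what changed: Replaced A's accumulator loop (which rebuilds the result by repeated string concatenation and restarts the accumulator at every element equal to arr[0]) by a single quote-and-join expression over the whole list.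
-- intended difference: On lists whose first element reappears later, A's accumulator reset makes it return only the quoted suffix from the last such occurrence (e.g. ['a','b','a'] -> "'a'"), while B returns the full quoted comma-joined list ("'a', 'b', 'a'"), which is the intended value for building a comma-separated quoted string of the whole array. — e.g. on create_str_list(["a", "b", "a"]): A returns "'a'", B returns "'a', 'b', 'a'"
import Mathlib
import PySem

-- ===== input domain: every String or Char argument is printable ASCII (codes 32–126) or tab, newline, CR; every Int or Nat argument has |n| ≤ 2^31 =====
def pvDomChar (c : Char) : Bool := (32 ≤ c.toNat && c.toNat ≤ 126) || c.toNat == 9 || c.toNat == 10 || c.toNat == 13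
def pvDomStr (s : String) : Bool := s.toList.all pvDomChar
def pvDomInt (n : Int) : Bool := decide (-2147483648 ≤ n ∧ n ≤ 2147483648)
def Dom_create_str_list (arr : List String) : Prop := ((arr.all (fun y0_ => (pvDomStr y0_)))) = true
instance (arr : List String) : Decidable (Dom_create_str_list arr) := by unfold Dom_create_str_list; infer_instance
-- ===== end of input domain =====

-- B replaces A's reset-accumulator concatenation loop by one quote-and-join expression;
-- where A's reset drops earlier elements (first element repeated later) B keeps the whole list (see D_ below).

-- ===== PORT A =====
-- the loop resets result whenever the element equals arr[0] (arr[0] read only inside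
-- the loop, where arr is nonempty, so headD's default is never used)
def create_str_list (arr : List String) : String :=
  arr.foldl
    (fun result s =>
      if s = arr.headD "" then "'" ++ s ++ "'"
      else result ++ ", '" ++ s ++ "'")
    ""

-- ===== PORT B =====
def create_str_list_alt (arr : List String) : String :=
  PySem.Str.join ", " (arr.map (fun x => "'" ++ x ++ "'"))

-- ===== PRECONDITION & SPEC =====
-- On lists whose first element reappears later, A's accumulator reset returns only the
-- quoted suffix from the last such occurrence; B returns the full quoted comma-joined
-- list, the intended value for building a comma-separated quoted string of the array.
def D_create_str_list (arr : List String) : Prop := arr ≠ [] ∧ arr.headD "" ∈ arr.tail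
instance (arr : List String) : Decidable (D_create_str_list arr) := by unfold D_create_str_list; infer_instance

def Spec_create_str_list (arr : List String) (out : String) : Prop := ¬ D_create_str_list arr → out = create_str_list_alt arr
instance (arr : List String) (out : String) : Decidable (Spec_create_str_list arr out) := by unfold Spec_create_str_list; infer_instance

def pvDiffWitness_create_str_list : List String := ["a", "b", "a"]
def pvDiffWitnessOut_create_str_list : String × String := ("'a'", "'a', 'b', 'a'")

-- ===== CLAIM (what is proved, stated in full; the proofs are below) =====
def Claim_unchanged_create_str_list : Prop := ∀ (arr : List String), Dom_create_str_list arr → Spec_create_str_list arr (create_str_list arr)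
def Claim_changed_create_str_list : Prop := Dom_create_str_list (pvDiffWitness_create_str_list) ∧ D_create_str_list (pvDiffWitness_create_str_list) ∧ create_str_list (pvDiffWitness_create_str_list) = pvDiffWitnessOut_create_str_list.1 ∧ create_str_list_alt (pvDiffWitness_create_str_list) = pvDiffWitnessOut_create_str_list.2 ∧ pvDiffWitnessOut_create_str_list.1 ≠ pvDiffWitnessOut_create_str_list.2
def Claim_exact_create_str_list : Prop := ∀ (arr : List String), Dom_create_str_list arr → D_create_str_list arr → create_str_list arr ≠ create_str_list_alt arr

-- ===== LEMMAS AND PROOFS =====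

-- the suffix of l strictly after the last occurrence of h (l if h ∉ l)
def pvAfterLast (h : String) : List String → List String
  | [] => []
  | x :: t => if h ∈ t then pvAfterLast h t else if x = h then t else pvAfterLast h t

-- ", '" ++ x ++ "'" for each element, concatenated
def pvTrail : List String → String
  | [] => ""
  | x :: t => ", '" ++ x ++ "'" ++ pvTrail t

lemma pvFold_not_mem (h : String) (l : List String) (acc : String) (hm : h ∉ l) :
    l.foldl (fun result s => if s = h then "'" ++ s ++ "'" else result ++ ", '" ++ s ++ "'") acc
      = acc ++ pvTrail l := by
  induction l generalizing acc with
  | nil => simp [pvTrail]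
  | cons x t ih =>
    have hx : x ≠ h := fun e => hm (e ▸ List.mem_cons_self)
    have ht : h ∉ t := fun e => hm (List.mem_cons_of_mem _ e)
    simp only [List.foldl_cons, if_neg hx, ih _ ht, pvTrail]
    apply String.ext
    simp [String.toList_append, List.append_assoc]

lemma pvFold_mem (h : String) (l : List String) (acc : String) (hm : h ∈ l) :
    l.foldl (fun result s => if s = h then "'" ++ s ++ "'" else result ++ ", '" ++ s ++ "'") acc
      = "'" ++ h ++ "'" ++ pvTrail (pvAfterLast h l) := by
  induction l generalizing acc with
  | nil => cases hm
  | cons x t ih =>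
    by_cases ht : h ∈ t
    · simp only [List.foldl_cons, pvAfterLast, if_pos ht, ih _ ht]
    · have hx : x = h := by
        rcases List.mem_cons.mp hm with e | e
        · exact e.symm
        · exact absurd e ht
      simp only [List.foldl_cons, pvAfterLast, if_neg ht,
        pvFold_not_mem h t _ ht, hx]
      simp

lemma pvJoin_quote (x : String) (l : List String) :
    PySem.Str.join ", " ((x :: l).map (fun s => "'" ++ s ++ "'"))
      = "'" ++ x ++ "'" ++ pvTrail l := by
  induction l generalizing x with
  | nil =>
    apply String.ext
    simp [PySem.Str.toList_join, PySem.Chars.join, pvTrail, String.toList_append,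
      List.intercalate]
  | cons y t ih =>
    apply String.ext
    have h2 := congrArg String.toList (ih y)
    simp only [PySem.Str.toList_join, List.map_cons, List.map_map] at h2 ⊢
    rw [PySem.Chars.join_cons_cons, h2]
    simp [pvTrail, String.toList_append, List.append_assoc]

-- inside D_, the dropped part of the list is a nonempty prefix
lemma pvAfterLast_proper (h : String) (t : List String) (hm : h ∈ t) :
    ∃ u, u ≠ [] ∧ t = u ++ pvAfterLast h t := by
  induction t with
  | nil => cases hm
  | cons x t' ih =>
    by_cases ht : h ∈ t'
    · obtain ⟨u, hu, he⟩ := ih ht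
      exact ⟨x :: u, by simp, by simp [pvAfterLast, if_pos ht, ← he]⟩
    · have hx : x = h := by
        rcases List.mem_cons.mp hm with e | e
        · exact e.symm
        · exact absurd e ht
      exact ⟨[x], by simp, by simp [pvAfterLast, if_neg ht, hx]⟩

lemma pvTrail_append (a b : List String) :
    pvTrail (a ++ b) = pvTrail a ++ pvTrail b := by
  induction a with
  | nil => simp [pvTrail]
  | cons x t ih =>
    simp only [List.cons_append, pvTrail, ih]
    apply String.ext
    simp [String.toList_append, List.append_assoc]

lemma pvTrail_len_pos (u : List String) (hu : u ≠ []) :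
    4 ≤ (pvTrail u).length := by
  match u with
  | [] => exact absurd rfl hu
  | x :: t =>
    show 4 ≤ (", '" ++ x ++ "'" ++ pvTrail t).length
    rw [String.length_append, String.length_append, String.length_append]
    have h1 : (", '" : String).length = 3 := rfl
    have h2 : ("'" : String).length = 1 := rfl
    omega

-- ===== VERDICT (by name: the statement is the Claim_ definition above) =====
theorem create_str_list_spec : Claim_unchanged_create_str_list := by
  intro arr _ hnd
  unfold create_str_list create_str_list_alt
  match arr with
  | [] => rfl
  | h :: rest =>
    have hnm : h ∉ rest := by
      intro hm
      exact hnd ⟨by simp, by simpa using hm⟩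
    rw [pvJoin_quote]
    simp only [List.foldl_cons, List.headD_cons, if_pos]
    simpa using pvFold_not_mem h rest _ hnm

theorem create_str_list_changed : Claim_changed_create_str_list := by
  unfold Claim_changed_create_str_list; decide

theorem create_str_list_tight : Claim_exact_create_str_list := by
  intro arr _ hd
  match arr with
  | [] => exact absurd rfl hd.1
  | h :: rest =>
    have hm : h ∈ rest := by simpa using hd.2
    have hA : create_str_list (h :: rest) = "'" ++ h ++ "'" ++ pvTrail (pvAfterLast h (h :: rest)) :=
      pvFold_mem h (h :: rest) "" List.mem_cons_self
    have hal : pvAfterLast h (h :: rest) = pvAfterLast h rest := by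
      simp [pvAfterLast, if_pos hm]
    have hB : create_str_list_alt (h :: rest) = "'" ++ h ++ "'" ++ pvTrail rest :=
      pvJoin_quote h rest
    rw [hA, hal, hB]
    set a := pvAfterLast h rest with ha
    obtain ⟨u, hu, he⟩ := pvAfterLast_proper h rest hm
    rw [← ha] at he
    intro heq
    have hlen := congrArg String.length heq
    rw [he, pvTrail_append] at hlen
    have h4 := pvTrail_len_pos u hu
    simp [String.length_append] at hlen
    rw [hlen] at h4
    simp at h4
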